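-- pv_equiv track=rewrite | github.com/predicateacademy/physical-computing | lightshow/lightshow_patterns.py | fill_right
-- ===== SOURCE A (Python) =====
-- def off(led):
-- 	patterns = []
-- 	pattern = ''
-- 	for x in range(len(led)):
-- 		pattern += '0'
-- 	patterns.append(pattern)
-- 	return patterns
--
-- def on(led):
-- 	patterns = []
-- 	pattern = ''
-- 	for x in range(len(led)):
-- 		pattern += '1'
-- 	patterns.append(pattern)
-- 	return patterns
--
-- def fill_right(led):
--    patterns = []
--    for x in range(len(led)):
--       l = off(led)
--       for item in l:
--          for idx in range(x):
--             tlist = list(item)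
--             tlist[len(tlist)-idx-1] = '1'
--             item = ''.join(tlist)
--          patterns.append(item)
--    patterns.extend(on(led))
--    return patterns
-- ===== SOURCE B (Python) =====
-- def fill_right(led):
--     n = len(led)
--     row = list('0' * n)
--     patterns = [''.join(row)]
--     for i in range(n):
--         row[n - 1 - i] = '1'
--         patterns.append(''.join(row))
--     return patterns
-- ===== Notes on version B (the rewrite author's own statement) =====
-- stated objective: faster
-- what changed: Replaces A's rebuild-each-row nested loops (off() per row, then x single-bit assignments each re-listing and re-joining the string) by one carried mutable buffer that flips exactly one bit per step and appends the joined row.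
import Mathlib
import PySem

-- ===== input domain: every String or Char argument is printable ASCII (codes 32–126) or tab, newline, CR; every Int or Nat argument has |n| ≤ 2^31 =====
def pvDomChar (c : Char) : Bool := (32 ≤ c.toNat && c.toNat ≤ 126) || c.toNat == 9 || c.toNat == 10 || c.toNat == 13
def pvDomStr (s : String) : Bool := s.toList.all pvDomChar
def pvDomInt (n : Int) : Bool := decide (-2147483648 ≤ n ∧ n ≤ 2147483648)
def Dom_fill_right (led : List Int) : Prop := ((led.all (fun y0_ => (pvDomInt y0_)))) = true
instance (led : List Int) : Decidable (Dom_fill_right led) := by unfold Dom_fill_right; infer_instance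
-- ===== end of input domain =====

-- B replaces A's per-row rebuild (off() per row plus x single-bit edits, each re-listing and
-- re-joining the whole string) by one carried buffer that flips one bit per step (objective: faster).

-- ===== PORT A =====
def pyOff (led : List Int) : List String :=
  let pattern := (PySem.List.pyRange 0 (led.length : Int) 1).foldl (fun p _ => p ++ "0") ""
  [pattern]

def pyOn (led : List Int) : List String :=
  let pattern := (PySem.List.pyRange 0 (led.length : Int) 1).foldl (fun p _ => p ++ "1") ""
  [pattern]

def fill_right (led : List Int) : List String :=
  let patterns := (PySem.List.pyRange 0 (led.length : Int) 1).foldl (fun patterns x =>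
    let l := pyOff led
    l.foldl (fun patterns item =>
      let item := (PySem.List.pyRange 0 x 1).foldl (fun item idx =>
        let tlist := item.toList
        -- tlist[len(tlist)-idx-1] = '1'  (the index is always in range: 0 ≤ idx < x ≤ len-1)
        let tlist := tlist.set (tlist.length - idx.toNat - 1) '1'
        String.ofList tlist) item
      patterns ++ [item]) patterns) ([] : List String)
  patterns ++ pyOn led

-- ===== PORT B =====
def fill_right_alt (led : List Int) : List String :=
  let n := led.length
  let st := (List.range n).foldl
    (fun (st : List Char × List String) i =>
      let row := st.1.set (n - 1 - i) '1'
      (row, st.2 ++ [String.ofList row]))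
    (List.replicate n '0', [String.ofList (List.replicate n '0')])
  st.2

-- ===== PRECONDITION & SPEC =====
def Spec_fill_right (led : List Int) (out : List String) : Prop := out = fill_right_alt led
instance (led : List Int) (out : List String) : Decidable (Spec_fill_right led out) := by unfold Spec_fill_right; infer_instance

-- ===== CLAIM (what is proved, stated in full; the proofs are below) =====
def Claim_equal_fill_right : Prop := ∀ (led : List Int), Dom_fill_right led → Spec_fill_right led (fill_right led)

-- ===== LEMMAS AND PROOFS =====

-- the k-th staircase row: n-k zeros then k ones
def rowStr (n k : Nat) : String := String.ofList (List.replicate (n - k) '0' ++ List.replicate k '1')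

theorem set_staircase (n m : Nat) (h : m < n) :
    (List.replicate (n - m) '0' ++ List.replicate m ('1' : Char)).set (n - 1 - m) '1'
      = List.replicate (n - (m+1)) '0' ++ List.replicate (m+1) '1' := by
  have h1 : n - m = (n - m - 1) + 1 := by omega
  rw [h1, List.replicate_succ', List.append_assoc,
      List.set_append_right _ _ (by simp; omega)]
  simp only [List.length_replicate]
  have h2 : n - 1 - m - (n - m - 1) = 0 := by omega
  have h3 : n - (m+1) = n - m - 1 := by omega
  rw [h2, h3, List.replicate_succ]
  simp

-- building the all-c string by repeated append
theorem foldl_append_const (l : List Int) (c : Char) (s : String) :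
    l.foldl (fun p _ => p ++ String.ofList [c]) s = String.ofList (s.toList ++ List.replicate l.length c) := by
  induction l generalizing s with
  | nil => simp
  | cons a t ih =>
      rw [List.foldl_cons, ih]
      simp [List.replicate_succ]

theorem pyOff_eq (led : List Int) : pyOff led = [String.ofList (List.replicate led.length '0')] := by
  unfold pyOff
  have h0 : ("0" : String) = String.ofList ['0'] := by simp
  rw [h0, foldl_append_const]
  simp [PySem.List.length_pyRange_one]

theorem pyOn_eq (led : List Int) : pyOn led = [String.ofList (List.replicate led.length '1')] := by
  unfold pyOn
  have h1 : ("1" : String) = String.ofList ['1'] := by simp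
  rw [h1, foldl_append_const]
  simp [PySem.List.length_pyRange_one]

-- A's inner bit-setting loop turns the all-zeros row into the staircase row m
theorem inner_loop_eq (n m : Nat) (h : m ≤ n) :
    (PySem.List.pyRange 0 (m : Int) 1).foldl (fun item idx =>
        let tlist := item.toList
        let tlist := tlist.set (tlist.length - idx.toNat - 1) '1'
        String.ofList tlist) (String.ofList (List.replicate n '0')) = rowStr n m := by
  induction m with
  | zero => simp [PySem.List.pyRange_one_eq_nil, rowStr]
  | succ m ih =>
      have hm : m ≤ n := by omega
      have hcast : ((m+1 : Nat) : Int) = (m : Int) + 1 := by push_cast; ring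
      rw [hcast, PySem.List.pyRange_one_succ_right (by positivity), List.foldl_append, ih hm]
      simp only [List.foldl_cons, List.foldl_nil, rowStr]
      simp only [String.toList_ofList, List.length_append, List.length_replicate]
      have hlen : n - m + m = n := by omega
      rw [hlen]
      have htn : (m : Int).toNat = m := by simp
      have hsw : n - m - 1 = n - 1 - m := by omega
      rw [htn, hsw, set_staircase n m (by omega)]

theorem foldl_append_map {α β : Type} (l : List α) (f : α → β) (acc : List β) :
    l.foldl (fun a x => a ++ [f x]) acc = acc ++ l.map f := by
  induction l generalizing acc with
  | nil => simp
  | cons a t ih => simp [List.foldl_cons, ih]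

theorem fill_right_closed (led : List Int) :
    fill_right led = (List.range (led.length + 1)).map (rowStr led.length) := by
  unfold fill_right
  rw [pyOff_eq, pyOn_eq]
  simp only [List.foldl_cons, List.foldl_nil]
  rw [foldl_append_map, PySem.List.pyRange_zero_natCast, List.map_map, List.nil_append]
  have hmap : ∀ g : Nat → String, (∀ k ∈ List.range led.length, g k = rowStr led.length k) →
      (List.range led.length).map g = (List.range led.length).map (rowStr led.length) :=
    fun g hg => List.map_congr_left hg
  rw [hmap _ (fun k hk => by
    simp only [Function.comp_apply]
    exact inner_loop_eq led.length k (Nat.le_of_lt (List.mem_range.mp hk)))]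
  rw [List.range_succ, List.map_append]
  simp [rowStr]

-- B's loop invariant
theorem alt_loop_eq (n m : Nat) (h : m ≤ n) :
    (List.range m).foldl
      (fun (st : List Char × List String) i =>
        let row := st.1.set (n - 1 - i) '1'
        (row, st.2 ++ [String.ofList row]))
      (List.replicate n '0', [String.ofList (List.replicate n '0')])
    = (List.replicate (n - m) '0' ++ List.replicate m '1',
       (List.range (m + 1)).map (rowStr n)) := by
  induction m with
  | zero => simp [rowStr]
  | succ m ih =>
      rw [List.range_succ, List.foldl_append, ih (by omega), List.foldl_cons, List.foldl_nil]
      simp only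
      rw [set_staircase n m (by omega)]
      rw [List.range_succ (n := m + 1), List.map_append]
      simp [rowStr]

theorem fill_right_alt_closed (led : List Int) :
    fill_right_alt led = (List.range (led.length + 1)).map (rowStr led.length) := by
  simp only [fill_right_alt, alt_loop_eq led.length led.length (le_refl _)]

-- ===== VERDICT (by name: the statement is the Claim_ definition above) =====
theorem fill_right_spec : Claim_equal_fill_right := by
  intro led _
  unfold Spec_fill_right
  rw [fill_right_closed, fill_right_alt_closed]
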